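-- pv_equiv track=rewrite | github.com/wafec/devstackops | virtualbox/vmbox/shell.py | _shell_separate_arguments
-- ===== SOURCE A (Python) =====
-- def _shell_separate_arguments(command):
--     i = 0
--     quote_found = False
--     builder = ''
--     while i < len(command):
--         c = command[i]
--         ignore = False
--         if quote_found and c == '\\':
--             builder += c
--             i += 1
--             if i < len(command):
--                 builder += command[i]
--         elif not quote_found and c == '"':
--             quote_found = True
--         elif quote_found and c == '"':
--             quote_found = False
--         elif quote_found and c == ' ':
--             builder += '&space;'
--             ignore = True
--         if not ignore:
--             builder += c
--         i += 1
--     values = builder.split(' ')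
--     values = [x.replace('&space;', ' ') for x in values]
--     values = [x[1:-1] if x.startswith('"') and x.endswith('"') else x for x in values]
--     return values
-- ===== SOURCE B (Python) =====
-- def _shell_separate_arguments(command):
--     tokens = []
--     current = ''
--     in_quote = False
--     i = 0
--     n = len(command)
--     while i < n:
--         c = command[i]
--         if in_quote and c == '\\':
--             current += c
--             if i + 1 < n:
--                 current += command[i + 1]
--                 i += 2
--             else:
--                 i += 1
--             continue
--         if c == '"':
--             in_quote = not in_quote
--             current += c
--         elif c == ' ' and not in_quote:
--             tokens.append(current)
--             current = ''
--         else: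
--             current += c
--         i += 1
--     tokens.append(current)
--     return [t[1:-1] if t.startswith('"') and t.endswith('"') else t
--             for t in tokens]
-- ===== Notes on version B (the rewrite author's own statement) =====
-- stated objective: simpler
-- what changed: B tokenizes in one direct pass (token list + current token + quote flag, splitting on unquoted spaces, a quoted backslash escaping the next character once) instead of A's encode-with-'&space;'-sentinel builder followed by a split/replace/strip pipeline.
-- intended difference: On commands containing the literal text '&space;' or a backslash inside a double-quoted region (a backslash preceded by an odd number of double quotes), A's sentinel-and-escape machinery misfires (a literal '&space;' collapses to a space, and an escaped character comes out with an extra duplicated backslash appended after it), while B keeps '&space;' literal and emits each quoted escape once, which is the intended tokenization. — e.g. on _shell_separate_arguments("&space;"): A returns [" "], B returns ["&space;"]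
import Mathlib
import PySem

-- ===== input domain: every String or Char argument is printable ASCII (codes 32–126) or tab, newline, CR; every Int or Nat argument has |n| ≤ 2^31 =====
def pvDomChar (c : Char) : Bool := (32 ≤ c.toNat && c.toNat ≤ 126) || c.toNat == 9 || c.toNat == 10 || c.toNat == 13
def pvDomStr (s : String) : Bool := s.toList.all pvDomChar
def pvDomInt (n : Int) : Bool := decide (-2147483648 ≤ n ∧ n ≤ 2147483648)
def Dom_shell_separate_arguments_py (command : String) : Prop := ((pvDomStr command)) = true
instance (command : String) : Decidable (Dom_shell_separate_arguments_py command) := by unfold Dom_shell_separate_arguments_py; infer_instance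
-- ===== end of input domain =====

-- B replaces A's '&space;'-sentinel builder + split/replace/strip pipeline by one direct
-- quote-aware tokenizer pass (simpler; same cost class on ordinary inputs).


-- ===== PORT A =====
-- the sentinel '&space;' A uses to protect quoted spaces across its split(' ')
def pvSent : List Char := ['&', 's', 'p', 'a', 'c', 'e', ';']

-- A's while loop: (rest of command, quote_found, builder) -> final builder
def pvABuild : List Char → Bool → List Char → List Char
  | [], _, b => b
  | c :: rest, q, b =>
    if q ∧ c = '\\' then
      match rest with
      | [] => b ++ [c, c]                       -- builder += c; i past end; builder += c
      | d :: r' => pvABuild r' q (b ++ [c, d, c])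
    else if ¬q ∧ c = '"' then pvABuild rest true (b ++ [c])
    else if q ∧ c = '"' then pvABuild rest false (b ++ [c])
    else if q ∧ c = ' ' then pvABuild rest q (b ++ pvSent)   -- ignore = True
    else pvABuild rest q (b ++ [c])

-- builder.split(' '), then replace('&space;', ' ') per token, then strip surrounding quotes
def shell_separate_arguments_py (command : String) : List String :=
  (((PySem.Chars.splitOn (pvABuild command.toList false []) [' ']).map
      (fun x => PySem.Chars.replace x pvSent [' '])).map
      (fun x =>
        if PySem.Chars.startswith x ['"'] && PySem.Chars.endswith x ['"']
        then PySem.Chars.slice x (some 1) (some (-1)) else x)).map String.ofList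

-- ===== PORT B =====
-- B's single pass: (rest, in_quote, current, tokens) -> tokens (pre-strip)
def pvBBuild : List Char → Bool → List Char → List (List Char) → List (List Char)
  | [], _, cur, acc => acc ++ [cur]
  | c :: rest, q, cur, acc =>
    if q ∧ c = '\\' then
      match rest with
      | [] => acc ++ [cur ++ [c]]               -- trailing backslash inside quotes
      | d :: r' => pvBBuild r' q (cur ++ [c, d]) acc
    else if c = '"' then pvBBuild rest (!q) (cur ++ [c]) acc
    else if c = ' ' ∧ ¬q then pvBBuild rest q [] (acc ++ [cur])
    else pvBBuild rest q (cur ++ [c]) acc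

def shell_separate_arguments_py_alt (command : String) : List String :=
  ((pvBBuild command.toList false [] []).map
      (fun t =>
        if PySem.Chars.startswith t ['"'] && PySem.Chars.endswith t ['"']
        then PySem.Chars.slice t (some 1) (some (-1)) else t)).map String.ofList

-- ===== PRECONDITION & SPEC =====
-- On commands containing the literal text '&space;' or a backslash inside a double-quoted
-- region (a backslash preceded by an odd number of '"', read off by one quote-parity scan),
-- A's sentinel-and-escape machinery
-- misfires (a literal '&space;' collapses to a space, and an escaped character comes out
-- with an extra duplicated backslash appended after it), while B keeps '&space;' literal
-- and emits each quoted escape once, which is the intended tokenization.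
-- one latched quote-parity scan of the input: true iff some backslash occurs at a
-- position where the number of preceding '"' is odd (i.e. inside a quoted region)
def pvQuotedBackslash (l : List Char) : Bool :=
  (l.foldl (fun st c => (xor st.1 (c == '"'), st.2 || (st.1 && c == '\\'))) (false, false)).2

def D_shell_separate_arguments_py (command : String) : Prop :=
  PySem.Chars.isIn pvSent command.toList = true ∨ pvQuotedBackslash command.toList = true
instance (command : String) : Decidable (D_shell_separate_arguments_py command) := by
  unfold D_shell_separate_arguments_py; infer_instance

def Spec_shell_separate_arguments_py (command : String) (out : List String) : Prop :=
  ¬ D_shell_separate_arguments_py command → out = shell_separate_arguments_py_alt command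
instance (command : String) (out : List String) : Decidable (Spec_shell_separate_arguments_py command out) := by
  unfold Spec_shell_separate_arguments_py; infer_instance

def pvDiffWitness_shell_separate_arguments_py : String := "&space;"
def pvDiffWitnessOut_shell_separate_arguments_py : (List String) × (List String) :=
  ([" "], ["&space;"])

-- ===== CLAIM (what is proved, stated in full; the proofs are below) =====
def Claim_unchanged_shell_separate_arguments_py : Prop :=
  ∀ (command : String), Dom_shell_separate_arguments_py command →
    Spec_shell_separate_arguments_py command (shell_separate_arguments_py command)
def Claim_changed_shell_separate_arguments_py : Prop :=
  Dom_shell_separate_arguments_py (pvDiffWitness_shell_separate_arguments_py) ∧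
  D_shell_separate_arguments_py (pvDiffWitness_shell_separate_arguments_py) ∧
  shell_separate_arguments_py (pvDiffWitness_shell_separate_arguments_py) = pvDiffWitnessOut_shell_separate_arguments_py.1 ∧
  shell_separate_arguments_py_alt (pvDiffWitness_shell_separate_arguments_py) = pvDiffWitnessOut_shell_separate_arguments_py.2 ∧
  pvDiffWitnessOut_shell_separate_arguments_py.1 ≠ pvDiffWitnessOut_shell_separate_arguments_py.2

-- ===== LEMMAS AND PROOFS =====

-- proof-side bridge: A's and B's loops agree exactly where this scan is false
-- (it is implied by ¬ D_, proved in pvBadFalse below)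
def pvBad : List Char → Bool → Bool
  | [], _ => false
  | c :: rest, q =>
    if pvSent.isPrefixOf (c :: rest) then true
    else if q ∧ c = '\\' then true
    else if c = '"' then pvBad rest (!q)
    else pvBad rest q

-- proof-side mirror of A's loop without the builder accumulator
def pvALoop : List Char → Bool → List Char
  | [], _ => []
  | c :: rest, q =>
    if q ∧ c = '\\' then
      match rest with
      | [] => [c, c]
      | d :: r' => c :: d :: c :: pvALoop r' q
    else if c = '"' then c :: pvALoop rest (!q)
    else if c = ' ' ∧ ¬q then c :: pvALoop rest q
    else if c = ' ' ∧ q then pvSent ++ pvALoop rest q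
    else c :: pvALoop rest q

-- proof-side mirror of B's loop: (first token continuation, remaining tokens)
def pvBLoop : List Char → Bool → List Char × List (List Char)
  | [], _ => ([], [])
  | c :: rest, q =>
    if q ∧ c = '\\' then
      match rest with
      | [] => ([c], [])
      | d :: r' => ((c :: d :: (pvBLoop r' q).1), (pvBLoop r' q).2)
    else if c = '"' then ((c :: (pvBLoop rest (!q)).1), (pvBLoop rest (!q)).2)
    else if c = ' ' ∧ ¬q then ([], (pvBLoop rest q).1 :: (pvBLoop rest q).2)
    else ((c :: (pvBLoop rest q).1), (pvBLoop rest q).2)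

-- split on ' ' as a pair (first token, remaining tokens)
def pvSp : List Char → List Char × List (List Char)
  | [] => ([], [])
  | c :: xs => if c = ' ' then ([], (pvSp xs).1 :: (pvSp xs).2) else ((c :: (pvSp xs).1), (pvSp xs).2)

-- Python's s.replace('&space;', ' ') as a fuelled left-to-right scan
def pvRepF : Nat → List Char → List Char
  | _, [] => []
  | 0, l => l
  | fuel + 1, c :: xs =>
    if pvSent.isPrefixOf (c :: xs) then ' ' :: pvRepF fuel (xs.drop 6) else c :: pvRepF fuel xs

def pvRep (l : List Char) : List Char := pvRepF l.length l

-- ---- one-step unfolding lemmas ----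

theorem sent_notPrefix_head (c : Char) (xs : List Char) (h : ¬ c = '&') :
    pvSent.isPrefixOf (c :: xs) = false := by
  rw [Bool.eq_false_iff]
  intro hT
  rw [List.isPrefixOf_iff_prefix] at hT
  exact h (List.cons_prefix_cons.mp hT).1.symm

theorem pvSp_space (xs : List Char) : pvSp (' ' :: xs) = ([], (pvSp xs).1 :: (pvSp xs).2) := rfl

theorem pvSp_cons (c : Char) (xs : List Char) (h : ¬ c = ' ') :
    pvSp (c :: xs) = (c :: (pvSp xs).1, (pvSp xs).2) := by
  rw [pvSp.eq_def]; simp [h]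

theorem pvALoop_esc1 : pvALoop ['\\'] true = ['\\', '\\'] := rfl

theorem pvALoop_esc (d : Char) (r' : List Char) :
    pvALoop ('\\' :: d :: r') true = '\\' :: d :: '\\' :: pvALoop r' true := rfl

theorem pvALoop_quote (rest : List Char) (q : Bool) :
    pvALoop ('"' :: rest) q = '"' :: pvALoop rest (!q) := by
  rw [pvALoop.eq_def]; simp

theorem pvALoop_sp_f (rest : List Char) : pvALoop (' ' :: rest) false = ' ' :: pvALoop rest false := by
  rw [pvALoop.eq_def]; simp

theorem pvALoop_sp_t (rest : List Char) : pvALoop (' ' :: rest) true = pvSent ++ pvALoop rest true := by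
  rw [pvALoop.eq_def]; simp

theorem pvALoop_plain (c : Char) (rest : List Char) (q : Bool)
    (h1 : ¬(q = true ∧ c = '\\')) (h2 : ¬ c = '"') (h3 : ¬ c = ' ') :
    pvALoop (c :: rest) q = c :: pvALoop rest q := by
  rw [pvALoop.eq_def]
  simp only [h2, h3, false_and, if_false]
  rw [if_neg h1]

theorem pvBLoop_quote (rest : List Char) (q : Bool) :
    pvBLoop ('"' :: rest) q = ('"' :: (pvBLoop rest (!q)).1, (pvBLoop rest (!q)).2) := by
  rw [pvBLoop.eq_def]; simp

theorem pvBLoop_sp_f (rest : List Char) :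
    pvBLoop (' ' :: rest) false = ([], (pvBLoop rest false).1 :: (pvBLoop rest false).2) := by
  rw [pvBLoop.eq_def]; simp

theorem pvBLoop_sp_t (rest : List Char) :
    pvBLoop (' ' :: rest) true = (' ' :: (pvBLoop rest true).1, (pvBLoop rest true).2) := by
  rw [pvBLoop.eq_def]; simp

theorem pvBLoop_plain (c : Char) (rest : List Char) (q : Bool)
    (h1 : ¬(q = true ∧ c = '\\')) (h2 : ¬ c = '"') (h3 : ¬ c = ' ') :
    pvBLoop (c :: rest) q = (c :: (pvBLoop rest q).1, (pvBLoop rest q).2) := by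
  rw [pvBLoop.eq_def]
  simp only [h2, h3, false_and, if_false]
  rw [if_neg h1]

theorem pvAB_esc1 (b : List Char) : pvABuild ['\\'] true b = b ++ ['\\', '\\'] := rfl

theorem pvAB_esc (d : Char) (r' b : List Char) :
    pvABuild ('\\' :: d :: r') true b = pvABuild r' true (b ++ ['\\', d, '\\']) := rfl

theorem pvAB_quote_f (rest b : List Char) :
    pvABuild ('"' :: rest) false b = pvABuild rest true (b ++ ['"']) := by
  rw [pvABuild.eq_def]; simp

theorem pvAB_quote_t (rest b : List Char) :
    pvABuild ('"' :: rest) true b = pvABuild rest false (b ++ ['"']) := by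
  rw [pvABuild.eq_def]; simp

theorem pvAB_sp_t (rest b : List Char) :
    pvABuild (' ' :: rest) true b = pvABuild rest true (b ++ pvSent) := by
  rw [pvABuild.eq_def]; simp

theorem pvAB_sp_f (rest b : List Char) :
    pvABuild (' ' :: rest) false b = pvABuild rest false (b ++ [' ']) := by
  rw [pvABuild.eq_def]; simp

theorem pvAB_plain (c : Char) (rest : List Char) (q : Bool) (b : List Char)
    (h1 : ¬(q = true ∧ c = '\\')) (h2 : ¬ c = '"') (h3 : ¬ c = ' ') :
    pvABuild (c :: rest) q b = pvABuild rest q (b ++ [c]) := by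
  rw [pvABuild.eq_def]
  simp only [h2, h3, and_false, if_false]
  rw [if_neg h1]

theorem pvBB_esc1 (cur : List Char) (acc : List (List Char)) :
    pvBBuild ['\\'] true cur acc = acc ++ [cur ++ ['\\']] := rfl

theorem pvBB_esc (d : Char) (r' cur : List Char) (acc : List (List Char)) :
    pvBBuild ('\\' :: d :: r') true cur acc = pvBBuild r' true (cur ++ ['\\', d]) acc := rfl

theorem pvBB_quote (rest cur : List Char) (q : Bool) (acc : List (List Char)) :
    pvBBuild ('"' :: rest) q cur acc = pvBBuild rest (!q) (cur ++ ['"']) acc := by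
  rw [pvBBuild.eq_def]; simp

theorem pvBB_sp_f (rest cur : List Char) (acc : List (List Char)) :
    pvBBuild (' ' :: rest) false cur acc = pvBBuild rest false [] (acc ++ [cur]) := by
  rw [pvBBuild.eq_def]; simp

theorem pvBB_sp_t (rest cur : List Char) (acc : List (List Char)) :
    pvBBuild (' ' :: rest) true cur acc = pvBBuild rest true (cur ++ [' ']) acc := by
  rw [pvBBuild.eq_def]; simp

theorem pvBB_plain (c : Char) (rest cur : List Char) (q : Bool) (acc : List (List Char))
    (h1 : ¬(q = true ∧ c = '\\')) (h2 : ¬ c = '"') (h3 : ¬ c = ' ') :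
    pvBBuild (c :: rest) q cur acc = pvBBuild rest q (cur ++ [c]) acc := by
  rw [pvBBuild.eq_def]
  simp only [h2, h3, false_and, if_false]
  rw [if_neg h1]

theorem pvBad_esc (rest : List Char) : pvBad ('\\' :: rest) true = true := by
  rw [pvBad.eq_def]; simp [sent_notPrefix_head '\\' rest (by decide)]

theorem pvBad_quote (rest : List Char) (q : Bool) :
    pvBad ('"' :: rest) q = pvBad rest (!q) := by
  rw [pvBad.eq_def]; simp [sent_notPrefix_head '"' rest (by decide)]

theorem pvBad_sp_f (rest : List Char) : pvBad (' ' :: rest) false = pvBad rest false := by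
  rw [pvBad.eq_def]; simp [sent_notPrefix_head ' ' rest (by decide)]

theorem pvBad_sp_t (rest : List Char) : pvBad (' ' :: rest) true = pvBad rest true := by
  rw [pvBad.eq_def]; simp [sent_notPrefix_head ' ' rest (by decide)]

theorem pvBad_plain (c : Char) (rest : List Char) (q : Bool)
    (h1 : ¬(q = true ∧ c = '\\')) (h2 : ¬ c = '"')
    (hs : pvSent.isPrefixOf (c :: rest) = false) :
    pvBad (c :: rest) q = pvBad rest q := by
  rw [pvBad.eq_def]
  simp only [hs, Bool.false_eq_true, if_false, h2]
  rw [if_neg h1]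

-- ---- facts about pvRep ----

theorem pvRepF_congr : ∀ (f₁ f₂ : Nat) (l : List Char), l.length ≤ f₁ → l.length ≤ f₂ →
    pvRepF f₁ l = pvRepF f₂ l := by
  intro f₁
  induction f₁ with
  | zero =>
    intro f₂ l h1 _
    have hl : l = [] := by cases l with | nil => rfl | cons a as => simp at h1
    subst hl; cases f₂ <;> simp [pvRepF]
  | succ n ih =>
    intro f₂ l h1 h2
    cases l with
    | nil => cases f₂ <;> simp [pvRepF]
    | cons c xs =>
      cases f₂ with
      | zero => simp at h2
      | succ m =>
        simp only [List.length_cons, Nat.add_le_add_iff_right] at h1 h2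
        simp only [pvRepF]
        by_cases hp : pvSent.isPrefixOf (c :: xs) = true
        · simp only [hp, if_true]
          rw [ih m (xs.drop 6) (by simp; omega) (by simp; omega)]
        · simp only [Bool.not_eq_true] at hp
          simp only [hp, Bool.false_eq_true, if_false]
          rw [ih m xs h1 h2]

theorem pvRep_cons_not (c : Char) (xs : List Char) (h : pvSent.isPrefixOf (c :: xs) = false) :
    pvRep (c :: xs) = c :: pvRep xs := by
  unfold pvRep
  simp only [List.length_cons, pvRepF, h, Bool.false_eq_true, if_false]

theorem pvRep_sent (xs : List Char) : pvRep (pvSent ++ xs) = ' ' :: pvRep xs := by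
  unfold pvRep
  have h7 : (pvSent ++ xs).length = xs.length + 6 + 1 := by simp [pvSent]
  rw [h7]
  have hshape : pvSent ++ xs = '&' :: 's' :: 'p' :: 'a' :: 'c' :: 'e' :: ';' :: xs := rfl
  rw [hshape]
  have hpre : pvSent.isPrefixOf ('&' :: 's' :: 'p' :: 'a' :: 'c' :: 'e' :: ';' :: xs) = true := by
    rw [List.isPrefixOf_iff_prefix]
    exact ⟨xs, rfl⟩
  rw [pvRepF]
  simp only [hpre, if_true, List.drop_succ_cons, List.drop_zero]
  rw [pvRepF_congr (xs.length + 6) xs.length xs (by omega) (by omega)]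

theorem pvSp_fst_prefix : ∀ l : List Char, (pvSp l).1 <+: l := by
  intro l
  induction l with
  | nil => exact List.nil_prefix
  | cons c xs ih =>
    by_cases h : c = ' '
    · subst h; rw [pvSp_space]; exact List.nil_prefix
    · rw [pvSp_cons c xs h]; exact List.cons_prefix_cons.mpr ⟨rfl, ih⟩

theorem pvPlainPrefix : ∀ (p : List Char), (∀ a ∈ p, a ≠ ' ' ∧ a ≠ '"' ∧ a ≠ '\\' ∧ a ≠ '&') →
    ∀ (l : List Char) (q : Bool), p <+: pvALoop l q → p <+: l := by
  intro p
  induction p with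
  | nil => intro _ l q _; exact List.nil_prefix
  | cons a p' ih =>
    intro hmem l q hpre
    obtain ⟨ha1, ha2, ha3, ha4⟩ := hmem a (by simp)
    cases l with
    | nil => simp [pvALoop, List.prefix_nil] at hpre
    | cons c rest =>
      by_cases h1 : q = true ∧ c = '\\'
      · obtain ⟨hq, hc⟩ := h1
        subst hq; subst hc
        cases rest with
        | nil =>
          rw [pvALoop_esc1] at hpre
          exact absurd (List.cons_prefix_cons.mp hpre).1 ha3
        | cons d r' =>
          rw [pvALoop_esc] at hpre
          exact absurd (List.cons_prefix_cons.mp hpre).1 ha3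
      · by_cases h2 : c = '"'
        · subst h2
          rw [pvALoop_quote] at hpre
          exact absurd (List.cons_prefix_cons.mp hpre).1 ha2
        · by_cases h3 : c = ' '
          · subst h3
            cases q with
            | false =>
              rw [pvALoop_sp_f] at hpre
              exact absurd (List.cons_prefix_cons.mp hpre).1 ha1
            | true =>
              rw [pvALoop_sp_t,
                  show pvSent ++ pvALoop rest true
                    = '&' :: ('s' :: 'p' :: 'a' :: 'c' :: 'e' :: ';' :: pvALoop rest true) from rfl] at hpre
              exact absurd (List.cons_prefix_cons.mp hpre).1 ha4
          · rw [pvALoop_plain c rest q h1 h2 h3] at hpre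
            obtain ⟨hac, hp'⟩ := List.cons_prefix_cons.mp hpre
            exact List.cons_prefix_cons.mpr ⟨hac, ih (fun b hb => hmem b (by simp [hb])) rest q hp'⟩

-- ---- the accumulator eliminations ----

theorem pvABuild_eq : ∀ (n : Nat) (l : List Char) (q : Bool) (b : List Char), l.length ≤ n →
    pvABuild l q b = b ++ pvALoop l q := by
  intro n
  induction n with
  | zero =>
    intro l q b hl
    have : l = [] := by cases l with | nil => rfl | cons x xs => simp at hl
    subst this; simp [pvABuild, pvALoop]
  | succ n ih =>
    intro l q b hl
    cases l with
    | nil => simp [pvABuild, pvALoop]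
    | cons c rest =>
      simp only [List.length_cons, Nat.add_le_add_iff_right] at hl
      by_cases h1 : q = true ∧ c = '\\'
      · obtain ⟨hq, hc⟩ := h1
        subst hq; subst hc
        cases rest with
        | nil => rw [pvAB_esc1, pvALoop_esc1]
        | cons d r' =>
          rw [pvAB_esc, pvALoop_esc, ih r' true _ (by simp at hl; omega)]
          simp
      · by_cases h2 : c = '"'
        · subst h2
          cases q with
          | false =>
            rw [pvAB_quote_f, pvALoop_quote, ih rest true _ hl]
            simp
          | true =>
            rw [pvAB_quote_t, pvALoop_quote, ih rest false _ hl]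
            simp
        · by_cases h3 : c = ' '
          · subst h3
            cases q with
            | false =>
              rw [pvAB_sp_f, pvALoop_sp_f, ih rest false _ hl]
              simp
            | true =>
              rw [pvAB_sp_t, pvALoop_sp_t, ih rest true _ hl]
              simp
          · rw [pvAB_plain c rest q b h1 h2 h3, pvALoop_plain c rest q h1 h2 h3,
                ih rest q _ hl]
            simp

theorem pvBBuild_eq : ∀ (n : Nat) (l : List Char) (q : Bool) (cur : List Char)
    (acc : List (List Char)), l.length ≤ n →
    pvBBuild l q cur acc = acc ++ (cur ++ (pvBLoop l q).1) :: (pvBLoop l q).2 := by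
  intro n
  induction n with
  | zero =>
    intro l q cur acc hl
    have : l = [] := by cases l with | nil => rfl | cons x xs => simp at hl
    subst this; simp [pvBBuild, pvBLoop]
  | succ n ih =>
    intro l q cur acc hl
    cases l with
    | nil => simp [pvBBuild, pvBLoop]
    | cons c rest =>
      simp only [List.length_cons, Nat.add_le_add_iff_right] at hl
      by_cases h1 : q = true ∧ c = '\\'
      · obtain ⟨hq, hc⟩ := h1
        subst hq; subst hc
        cases rest with
        | nil => rw [pvBB_esc1]; rfl
        | cons d r' =>
          rw [pvBB_esc, ih r' true _ _ (by simp at hl; omega)]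
          simp [pvBLoop]
      · by_cases h2 : c = '"'
        · subst h2
          rw [pvBB_quote, pvBLoop_quote, ih rest (!q) _ _ hl]
          simp
        · by_cases h3 : c = ' '
          · subst h3
            cases q with
            | false =>
              rw [pvBB_sp_f, pvBLoop_sp_f, ih rest false _ _ hl]
              simp
            | true =>
              rw [pvBB_sp_t, pvBLoop_sp_t, ih rest true _ _ hl]
              simp
          · rw [pvBB_plain c rest cur q acc h1 h2 h3, pvBLoop_plain c rest q h1 h2 h3,
                ih rest q _ _ hl]
            simp

-- ---- PySem.Chars.splitOn / replace expressed by pvSp / pvRep ----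

theorem pvGo_zero (l cur : List Char) (acc : List (List Char)) :
    PySem.Chars.splitOn.go [' '] 0 l cur acc = ((cur.reverse ++ l) :: acc).reverse := rfl

theorem pvGo_nil (n : Nat) (cur : List Char) (acc : List (List Char)) :
    PySem.Chars.splitOn.go [' '] (n + 1) [] cur acc = (cur.reverse :: acc).reverse := rfl

theorem pvGo_cons (n : Nat) (c : Char) (rest cur : List Char) (acc : List (List Char)) :
    PySem.Chars.splitOn.go [' '] (n + 1) (c :: rest) cur acc
      = if ([' '] : List Char).isPrefixOf (c :: rest)
        then PySem.Chars.splitOn.go [' '] n (List.drop 1 (c :: rest)) [] (cur.reverse :: acc)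
        else PySem.Chars.splitOn.go [' '] n rest (c :: cur) acc := by
  rw [PySem.Chars.splitOn.go.eq_def]; rfl

theorem pvSplitOn_go_eq : ∀ (fuel : Nat) (l cur : List Char) (acc : List (List Char)),
    l.length ≤ fuel →
    PySem.Chars.splitOn.go [' '] fuel l cur acc
      = acc.reverse ++ (cur.reverse ++ (pvSp l).1) :: (pvSp l).2 := by
  intro fuel
  induction fuel with
  | zero =>
    intro l cur acc hl
    have : l = [] := by cases l with | nil => rfl | cons x xs => simp at hl
    subst this
    rw [pvGo_zero]
    simp [pvSp]
  | succ n ih =>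
    intro l cur acc hl
    cases l with
    | nil => rw [pvGo_nil]; simp [pvSp]
    | cons c rest =>
      simp only [List.length_cons, Nat.add_le_add_iff_right] at hl
      rw [pvGo_cons]
      by_cases hc : c = ' '
      · subst hc
        have hp : ([' '] : List Char).isPrefixOf (' ' :: rest) = true := by
          rw [List.isPrefixOf_iff_prefix]
          exact List.cons_prefix_cons.mpr ⟨rfl, List.nil_prefix⟩
        rw [if_pos hp]
        rw [ih (List.drop 1 (' ' :: rest)) [] (cur.reverse :: acc) (by simpa using hl)]
        rw [pvSp_space]
        simp
      · have hp : ([' '] : List Char).isPrefixOf (c :: rest) = false := by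
          rw [Bool.eq_false_iff]
          intro hT
          rw [List.isPrefixOf_iff_prefix] at hT
          exact hc (List.cons_prefix_cons.mp hT).1.symm
        simp only [hp, Bool.false_eq_true, if_false]
        rw [ih rest (c :: cur) acc hl]
        rw [pvSp_cons c rest hc]
        simp

theorem pvSplitOn_eq (l : List Char) :
    PySem.Chars.splitOn l [' '] = (pvSp l).1 :: (pvSp l).2 := by
  unfold PySem.Chars.splitOn
  rw [pvSplitOn_go_eq (l.length + 1) l [] [] (by omega)]
  simp

theorem pvRGo_zero (l acc : List Char) :
    PySem.Chars.replace.go pvSent [' '] 0 l acc = acc.reverse ++ l := rfl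

theorem pvRGo_nil (n : Nat) (acc : List Char) :
    PySem.Chars.replace.go pvSent [' '] (n + 1) [] acc = acc.reverse := rfl

theorem pvRGo_cons (n : Nat) (c : Char) (t acc : List Char) :
    PySem.Chars.replace.go pvSent [' '] (n + 1) (c :: t) acc
      = if pvSent.isPrefixOf (c :: t)
        then PySem.Chars.replace.go pvSent [' '] n (List.drop pvSent.length (c :: t))
              (([' '] : List Char).reverse ++ acc)
        else PySem.Chars.replace.go pvSent [' '] n t (c :: acc) := by
  rw [PySem.Chars.replace.go.eq_def]; try rfl

theorem pvReplace_go_eq : ∀ (fuel : Nat) (l acc : List Char), l.length ≤ fuel →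
    PySem.Chars.replace.go pvSent [' '] fuel l acc = acc.reverse ++ pvRep l := by
  intro fuel
  induction fuel with
  | zero =>
    intro l acc hl
    have : l = [] := by cases l with | nil => rfl | cons x xs => simp at hl
    subst this
    rw [pvRGo_zero]
    simp [pvRep, pvRepF]
  | succ n ih =>
    intro l acc hl
    cases l with
    | nil => rw [pvRGo_nil]; simp [pvRep, pvRepF]
    | cons c rest =>
      simp only [List.length_cons, Nat.add_le_add_iff_right] at hl
      rw [pvRGo_cons]
      by_cases hp : pvSent.isPrefixOf (c :: rest) = true
      · rw [if_pos hp]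
        rw [ih (List.drop pvSent.length (c :: rest)) (([' '] : List Char).reverse ++ acc)
            (by simp [pvSent]; omega)]
        have hrep : pvRep (c :: rest) = ' ' :: pvRep ((c :: rest).drop 7) := by
          unfold pvRep
          simp only [List.length_cons, pvRepF, hp, if_true, List.drop_succ_cons]
          rw [pvRepF_congr rest.length (rest.drop 6).length (rest.drop 6) (by simp) le_rfl]
        rw [hrep]
        simp [pvSent]
      · simp only [Bool.not_eq_true] at hp
        rw [if_neg (by simp [hp])]
        rw [ih rest (c :: acc) hl, pvRep_cons_not c rest hp]
        simp

theorem pvReplace_eq (l : List Char) :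
    PySem.Chars.replace l pvSent [' '] = pvRep l := by
  unfold PySem.Chars.replace
  rw [if_neg (by simp [pvSent])]
  rw [pvReplace_go_eq l.length l [] le_rfl]
  simp

-- ---- the heart: A's encode/split/decode equals B's direct tokenization ----

theorem pvTail6_plain :
    ∀ a ∈ (['s', 'p', 'a', 'c', 'e', ';'] : List Char),
      a ≠ ' ' ∧ a ≠ '"' ∧ a ≠ '\\' ∧ a ≠ '&' := by
  intro a ha
  simp only [List.mem_cons, List.not_mem_nil, or_false] at ha
  rcases ha with rfl | rfl | rfl | rfl | rfl | rfl <;>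
    exact ⟨by decide, by decide, by decide, by decide⟩

set_option maxRecDepth 4096 in
theorem pvMain : ∀ (n : Nat) (l : List Char) (q : Bool), l.length ≤ n → pvBad l q = false →
    pvRep (pvSp (pvALoop l q)).1 :: ((pvSp (pvALoop l q)).2).map pvRep
      = (pvBLoop l q).1 :: (pvBLoop l q).2 := by
  intro n
  induction n with
  | zero =>
    intro l q hl _
    have : l = [] := by cases l with | nil => rfl | cons x xs => simp at hl
    subst this; simp [pvALoop, pvBLoop, pvSp, pvRep, pvRepF]
  | succ n ih =>
    intro l q hl hbad
    cases l with
    | nil => simp [pvALoop, pvBLoop, pvSp, pvRep, pvRepF]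
    | cons c rest =>
      simp only [List.length_cons, Nat.add_le_add_iff_right] at hl
      have hsent : pvSent.isPrefixOf (c :: rest) = false := by
        cases hps : pvSent.isPrefixOf (c :: rest) with
        | false => rfl
        | true => rw [pvBad.eq_def] at hbad; simp [hps] at hbad
      by_cases h1 : q = true ∧ c = '\\'
      · obtain ⟨hq, hc⟩ := h1
        subst hq; subst hc
        rw [pvBad_esc] at hbad
        exact absurd hbad (by simp)
      · by_cases h2 : c = '"'
        · subst h2
          rw [pvBad_quote] at hbad
          rw [pvALoop_quote, pvBLoop_quote]
          have hy := ih rest (!q) hl hbad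
          rw [pvSp_cons '"' _ (by decide)]
          rw [pvRep_cons_not '"' _ (sent_notPrefix_head '"' _ (by decide))]
          rw [List.cons.injEq] at hy
          rw [hy.1, hy.2]
        · by_cases h3 : c = ' '
          · subst h3
            cases q with
            | false =>
              rw [pvBad_sp_f] at hbad
              rw [pvALoop_sp_f, pvBLoop_sp_f]
              have hy := ih rest false hl hbad
              rw [pvSp_space]
              have hnil : pvRep [] = [] := rfl
              rw [hnil, List.map_cons, hy]
            | true =>
              rw [pvBad_sp_t] at hbad
              rw [pvALoop_sp_t, pvBLoop_sp_t]
              have hy := ih rest true hl hbad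
              have hsp : pvSp (pvSent ++ pvALoop rest true)
                  = ('&' :: 's' :: 'p' :: 'a' :: 'c' :: 'e' :: ';' :: (pvSp (pvALoop rest true)).1,
                     (pvSp (pvALoop rest true)).2) := by
                rw [show pvSent ++ pvALoop rest true
                      = '&' :: 's' :: 'p' :: 'a' :: 'c' :: 'e' :: ';' :: pvALoop rest true from rfl]
                rw [pvSp_cons '&' _ (by decide), pvSp_cons 's' _ (by decide),
                    pvSp_cons 'p' _ (by decide), pvSp_cons 'a' _ (by decide),
                    pvSp_cons 'c' _ (by decide), pvSp_cons 'e' _ (by decide),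
                    pvSp_cons ';' _ (by decide)]
              rw [hsp]
              rw [show ('&' :: 's' :: 'p' :: 'a' :: 'c' :: 'e' :: ';'
                    :: (pvSp (pvALoop rest true)).1, (pvSp (pvALoop rest true)).2).1
                  = pvSent ++ (pvSp (pvALoop rest true)).1 from rfl]
              rw [pvRep_sent]
              rw [List.cons.injEq] at hy
              rw [hy.1, hy.2]
          · rw [pvBad_plain c rest q h1 h2 hsent] at hbad
            rw [pvALoop_plain c rest q h1 h2 h3, pvBLoop_plain c rest q h1 h2 h3]
            have hy := ih rest q hl hbad
            rw [pvSp_cons _ _ h3]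
            have hpre : pvSent.isPrefixOf (c :: (pvSp (pvALoop rest q)).1) = false := by
              by_cases hc : c = '&'
              · rw [Bool.eq_false_iff]
                intro hT
                rw [List.isPrefixOf_iff_prefix] at hT
                have hcp := List.cons_prefix_cons.mp hT
                have h6 : (['s', 'p', 'a', 'c', 'e', ';'] : List Char) <+: pvALoop rest q :=
                  hcp.2.trans (pvSp_fst_prefix _)
                have h7 : (['s', 'p', 'a', 'c', 'e', ';'] : List Char) <+: rest :=
                  pvPlainPrefix _ pvTail6_plain rest q h6
                have h8 : pvSent <+: c :: rest := by
                  subst hc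
                  exact List.cons_prefix_cons.mpr ⟨rfl, h7⟩
                rw [← List.isPrefixOf_iff_prefix, hsent] at h8
                simp at h8
              · exact sent_notPrefix_head c _ hc
            rw [pvRep_cons_not _ _ hpre]
            rw [List.cons.injEq] at hy
            rw [hy.1, hy.2]

-- proof-side scanner: true iff the command has a backslash inside a double-quoted region
def pvEsc : List Char → Bool → Bool
  | [], _ => false
  | c :: rest, q =>
    if q ∧ c = '\\' then true
    else if c = '"' then pvEsc rest (!q)
    else pvEsc rest q

theorem pvEsc_cons (c : Char) (rest : List Char) (q : Bool) :
    pvEsc (c :: rest) q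
      = if q = true ∧ c = '\\' then true
        else if c = '"' then pvEsc rest (!q) else pvEsc rest q := rfl

theorem pvBadFalse : ∀ (n : Nat) (l : List Char) (q : Bool), l.length ≤ n →
    ¬ (pvSent <:+: l) → pvEsc l q = false → pvBad l q = false := by
  intro n
  induction n with
  | zero =>
    intro l q hl _ _
    have : l = [] := by cases l with | nil => rfl | cons x xs => simp at hl
    subst this; rfl
  | succ n ih =>
    intro l q hl hinf hesc
    cases l with
    | nil => rfl
    | cons c rest =>
      simp only [List.length_cons, Nat.add_le_add_iff_right] at hl
      have hinf' : ¬ (pvSent <:+: rest) := by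
        intro h
        obtain ⟨s, t, hst⟩ := h
        exact hinf ⟨c :: s, t, by rw [← hst]; rfl⟩
      have hs : pvSent.isPrefixOf (c :: rest) = false := by
        cases hps : pvSent.isPrefixOf (c :: rest) with
        | false => rfl
        | true =>
          rw [List.isPrefixOf_iff_prefix] at hps
          exact absurd hps.isInfix hinf
      by_cases h1 : q = true ∧ c = '\\'
      · rw [pvEsc_cons, if_pos h1] at hesc
        exact absurd hesc (by simp)
      · by_cases h2 : c = '"'
        · subst h2
          rw [pvEsc_cons, if_neg h1, if_pos rfl] at hesc
          rw [pvBad_quote]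
          exact ih rest (!q) hl hinf' hesc
        · rw [pvEsc_cons, if_neg h1, if_neg h2] at hesc
          rw [pvBad.eq_def]
          simp only [hs, Bool.false_eq_true, if_false, h2]
          rw [if_neg h1]
          exact ih rest q hl hinf' hesc

theorem pvScan_latched : ∀ (l : List Char) (a : Bool),
    (l.foldl (fun st c => (xor st.1 (c == '"'), st.2 || (st.1 && c == '\\'))) (a, true)).2 = true := by
  intro l
  induction l with
  | nil => intro a; rfl
  | cons c rest ih => intro a; simpa using ih _

theorem pvScan_eq_pvEsc : ∀ (l : List Char) (q : Bool),
    (l.foldl (fun st c => (xor st.1 (c == '"'), st.2 || (st.1 && c == '\\'))) (q, false)).2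
      = pvEsc l q := by
  intro l
  induction l with
  | nil => intro q; rfl
  | cons c rest ih =>
    intro q
    rw [pvEsc_cons]
    by_cases h1 : q = true ∧ c = '\\'
    · rw [if_pos h1]
      obtain ⟨hq, hc⟩ := h1
      subst hq; subst hc
      simpa using pvScan_latched rest _
    · rw [if_neg h1]
      by_cases h2 : c = '"'
      · subst h2
        have hb : (q && ('"' == '\\' : Bool)) = false := by simp
        rw [List.foldl_cons]
        simp only [beq_self_eq_true, hb, Bool.or_false]
        by_cases hq : q = true
        · subst hq; simpa using ih false
        · simp only [Bool.not_eq_true] at hq; subst hq; simpa using ih true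
      · have hb : (q && (c == '\\' : Bool)) = false := by
          cases hq : q
          · simp
          · simp only [Bool.true_and]
            exact beq_eq_false_iff_ne.mpr (by intro hh; exact h1 ⟨hq, hh⟩)
        rw [List.foldl_cons]
        simp only [hb, Bool.or_false]
        have hxq : xor q (c == '"') = q := by
          simp [beq_eq_false_iff_ne.mpr h2]
        rw [hxq, if_neg h2, ih q]

theorem pvPortA_eval (command : String) :
    shell_separate_arguments_py command =
      ((pvRep (pvSp (pvABuild command.toList false [])).1
          :: ((pvSp (pvABuild command.toList false [])).2).map pvRep).map (fun x =>
        if PySem.Chars.startswith x ['"'] && PySem.Chars.endswith x ['"']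
        then PySem.Chars.slice x (some 1) (some (-1)) else x)).map String.ofList := by
  unfold shell_separate_arguments_py
  rw [pvSplitOn_eq]
  simp only [List.map_cons, pvReplace_eq]

-- ===== VERDICT (by name: the statement is the Claim_ definition above) =====
theorem shell_separate_arguments_py_spec : Claim_unchanged_shell_separate_arguments_py := by
  intro command _ hnd
  unfold D_shell_separate_arguments_py at hnd
  have hbad : pvBad command.toList false = false := by
    refine pvBadFalse command.toList.length command.toList false le_rfl ?_ ?_
    · intro h
      exact hnd (Or.inl ((PySem.Chars.isIn_iff_infix pvSent command.toList).mpr h))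
    · cases he : pvEsc command.toList false with
      | false => rfl
      | true =>
        exact absurd (Or.inr ((pvScan_eq_pvEsc command.toList false).trans he)) hnd
  show shell_separate_arguments_py command = shell_separate_arguments_py_alt command
  rw [pvPortA_eval]
  unfold shell_separate_arguments_py_alt
  rw [pvABuild_eq command.toList.length command.toList false [] le_rfl,
      pvBBuild_eq command.toList.length command.toList false [] [] le_rfl]
  simp only [List.nil_append]
  rw [pvMain command.toList.length command.toList false le_rfl hbad]

theorem shell_separate_arguments_py_changed : Claim_changed_shell_separate_arguments_py := by
  unfold Claim_changed_shell_separate_arguments_py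
  refine ⟨by decide, ?_, ?_, ?_, by decide⟩
  · unfold D_shell_separate_arguments_py pvDiffWitness_shell_separate_arguments_py
    left
    rw [show ("&space;" : String).toList = ['&', 's', 'p', 'a', 'c', 'e', ';'] by decide]
    decide
  · unfold pvDiffWitness_shell_separate_arguments_py
    rw [pvPortA_eval]
    rw [show ("&space;" : String).toList = ['&', 's', 'p', 'a', 'c', 'e', ';'] by decide]
    simp only [show pvABuild ['&', 's', 'p', 'a', 'c', 'e', ';'] false []
        = ['&', 's', 'p', 'a', 'c', 'e', ';'] by simp [pvABuild]]
    rw [show pvSp ['&', 's', 'p', 'a', 'c', 'e', ';']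
        = (['&', 's', 'p', 'a', 'c', 'e', ';'], []) by simp [pvSp]]
    rw [show pvRep ['&', 's', 'p', 'a', 'c', 'e', ';'] = [' '] from
      (pvRep_sent []).trans (by rfl)]
    decide
  · unfold pvDiffWitness_shell_separate_arguments_py shell_separate_arguments_py_alt
    rw [show ("&space;" : String).toList = ['&', 's', 'p', 'a', 'c', 'e', ';'] by decide]
    simp only [show pvBBuild ['&', 's', 'p', 'a', 'c', 'e', ';'] false [] []
        = [['&', 's', 'p', 'a', 'c', 'e', ';']] by simp [pvBBuild]]
    decide
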